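-- pv_equiv track=rewrite | github.com/mayur75584/GeeksForGeeks | GeeksforGeeks/208(Amend The Sentence).py | amendSentence
-- ===== SOURCE A (Python) =====
-- def amendSentence(s):
--     res=''
--     s1=s[0]
--     i=1
--     while(i<len(s)):
--         if s[i].isupper():
--             res+=s1.lower()+' '
--             s1=''
--             s1+=s[i]
--         else:
--             s1+=s[i]
--         i+=1
--     if len(s1)>0:
--         res+=s1.lower()
--     return res
-- ===== SOURCE B (Python) =====
-- def amendSentence(s):
--     return s[0].lower() + ''.join(
--         (' ' + c.lower()) if c.isupper() else c.lower() for c in s[1:]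
--     )
-- ===== Notes on version B (the rewrite author's own statement) =====
-- stated objective: idiomatic
-- what changed: B replaces A's buffered current-word accumulator (flushed at each uppercase letter and again after the loop, with quadratic string concatenation) by a single join over the tail that emits a space plus the lowercased character at each uppercase letter, keeping no word buffer.
import Mathlib
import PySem

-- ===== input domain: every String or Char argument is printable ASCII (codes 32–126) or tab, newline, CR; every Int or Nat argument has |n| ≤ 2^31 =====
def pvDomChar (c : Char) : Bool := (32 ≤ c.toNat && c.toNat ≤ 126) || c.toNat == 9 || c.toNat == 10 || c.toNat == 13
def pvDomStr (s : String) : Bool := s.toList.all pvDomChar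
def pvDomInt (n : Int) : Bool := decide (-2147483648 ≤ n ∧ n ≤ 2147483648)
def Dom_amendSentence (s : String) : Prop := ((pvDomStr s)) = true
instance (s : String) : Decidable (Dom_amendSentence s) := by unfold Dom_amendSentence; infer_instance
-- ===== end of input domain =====

-- B replaces A's buffered word accumulator with a single inline pass emitting a space before each uppercase letter (idiomatic decomposition; same result).


-- ===== PORT A =====
-- A's while loop over i = 1 .. len(s)-1 with state (res, s1), then the final flush of s1.
def amendLoopA (res s1 : List Char) : List Char → List Char
  | [] => if s1.length > 0 then res ++ PySem.Chars.lower s1 else res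
  | c :: cs =>
      if PySem.Chars.isupper c then
        amendLoopA (res ++ PySem.Chars.lower s1 ++ [' ']) [c] cs
      else
        amendLoopA res (s1 ++ [c]) cs

def amendSentence (s : String) : String :=
  match s.toList with
  | [] => ""            -- unreachable under Pre_: Python A raises IndexError at s[0]
  | c :: cs => String.ofList (amendLoopA [] [c] cs)

-- ===== PORT B =====
def amendPiece (c : Char) : List Char :=
  if PySem.Chars.isupper c then [' ', PySem.Chars.lowerChar c] else [PySem.Chars.lowerChar c]

def amendSentence_alt (s : String) : String :=
  match s.toList with
  | [] => ""            -- unreachable under Pre_: Python B raises IndexError at s[0]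
  | c :: cs => String.ofList (PySem.Chars.lowerChar c :: (cs.map amendPiece).flatten)

-- ===== PRECONDITION & SPEC =====
-- Pre_ excludes only the empty string, on which both A and B raise IndexError at s[0].
def Pre_amendSentence (s : String) : Prop := s ≠ ""
instance (s : String) : Decidable (Pre_amendSentence s) := by unfold Pre_amendSentence; infer_instance
def pvWitness_amendSentence : String := "helloWorld"

def Spec_amendSentence (s : String) (out : String) : Prop := out = amendSentence_alt s
instance (s : String) (out : String) : Decidable (Spec_amendSentence s out) := by unfold Spec_amendSentence; infer_instance

-- ===== CLAIM (what is proved, stated in full; the proofs are below) =====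
def Claim_equal_amendSentence : Prop := ∀ (s : String), Dom_amendSentence s → Pre_amendSentence s → Spec_amendSentence s (amendSentence s)

-- ===== LEMMAS AND PROOFS =====
-- Loop invariant: with a nonempty buffer s1, A's loop produces res ++ lower s1 ++ the flattened pieces.
lemma amendLoopA_eq (cs : List Char) : ∀ (res s1 : List Char), s1 ≠ [] →
    amendLoopA res s1 cs = res ++ PySem.Chars.lower s1 ++ (cs.map amendPiece).flatten := by
  induction cs with
  | nil =>
      intro res s1 h
      simp [amendLoopA, List.length_pos_iff, h]
  | cons c cs ih =>
      intro res s1 h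
      by_cases hc : PySem.Chars.isupper c = true
      · rw [amendLoopA, if_pos hc, ih _ [c] (by simp)]
        simp [amendPiece, hc, PySem.Chars.lower]
      · rw [amendLoopA, if_neg hc, ih _ (s1 ++ [c]) (by simp)]
        simp [amendPiece, hc, PySem.Chars.lower]

-- ===== VERDICT (by name: the statement is the Claim_ definition above) =====
theorem amendSentence_spec : Claim_equal_amendSentence := by
  intro s _ hpre
  unfold Spec_amendSentence amendSentence amendSentence_alt
  cases hs : s.toList with
  | nil => exact absurd (String.toList_eq_nil_iff.mp hs) hpre
  | cons c cs =>
      simp only [amendLoopA_eq cs [] [c] (by simp)]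
      simp [PySem.Chars.lower]
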